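-- pv_equiv track=rewrite | github.com/yeomkyeorae/algorithm | BJ/basic/2644_chonsoo.py | compose_own_parents
-- ===== SOURCE A (Python) =====
-- def compose_own_parents(me, jokbo):
--     jokbo_keys = jokbo.keys()
--     my_jokbo = [me]
--     while True:
--         find_parent = False
--         for parent in jokbo_keys:
--             if me in jokbo[parent]:
--                 find_parent = True
--                 my_jokbo.append(parent)
--                 me = parent
--                 break
--         if not find_parent:
--             break
--     return my_jokbo
-- ===== SOURCE B (Python) =====
-- def compose_own_parents(me, jokbo):
--     # Build a child -> parent reverse map once (first parent in key order wins),
--     # then follow parent links recursively, building the chain front-to-back.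
--     rev = {}
--     for parent, children in jokbo.items():
--         for c in children:
--             rev.setdefault(c, parent)
--
--     def chain(x):
--         if x not in rev:
--             return [x]
--         return [x] + chain(rev[x])
--
--     return chain(me)
-- ===== Notes on version B (the rewrite author's own statement) =====
-- stated objective: alternative
-- what changed: Instead of rescanning every parent's whole child list at each step of the ancestor chain, B builds a child-to-parent reverse dict in one pass and then follows parent links by recursive O(1) lookups, building the chain front-to-back by list cons instead of appending to an accumulator.
import Mathlib
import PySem

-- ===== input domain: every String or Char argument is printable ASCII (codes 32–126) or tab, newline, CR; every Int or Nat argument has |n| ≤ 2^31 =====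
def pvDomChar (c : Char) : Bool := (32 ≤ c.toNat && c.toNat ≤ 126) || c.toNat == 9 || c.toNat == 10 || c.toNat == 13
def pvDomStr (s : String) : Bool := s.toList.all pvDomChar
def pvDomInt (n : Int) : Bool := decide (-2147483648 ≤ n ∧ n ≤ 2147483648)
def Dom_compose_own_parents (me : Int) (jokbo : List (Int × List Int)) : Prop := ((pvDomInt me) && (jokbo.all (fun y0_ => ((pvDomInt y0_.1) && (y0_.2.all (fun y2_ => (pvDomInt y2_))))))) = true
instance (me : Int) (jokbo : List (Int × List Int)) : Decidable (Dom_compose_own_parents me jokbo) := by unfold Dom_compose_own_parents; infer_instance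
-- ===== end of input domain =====

-- B replaces A's rescan of every parent's child list at each chain step by a
-- child→parent reverse dict built once, then recursive link-following that builds
-- the chain front-to-back (alternative algorithm).
-- A's `while True` loop and B's recursion are ported with fuel jokbo.length + 1,
-- which suffices on every input admitted by Pre_ (where the Python terminates).

-- ===== PORT A =====
-- `for parent in jokbo_keys: if me in jokbo[parent]: … break` — first key whose child list contains me
def findParentA (d : PySem.Dict Int (List Int)) (me : Int) : Option Int :=
  (PySem.Dict.keys d).find? (fun parent => decide (me ∈ PySem.Dict.getD d parent []))

-- the `while True` loop: state (me, my_jokbo); stops when no parent is found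
def goA (d : PySem.Dict Int (List Int)) : Nat → Int → List Int → List Int
  | 0, _, acc => acc
  | f + 1, me, acc =>
    match findParentA d me with
    | none => acc
    | some p => goA d f p (acc ++ [p])

def compose_own_parents (me : Int) (jokbo : List (Int × List Int)) : List Int :=
  goA (PySem.Dict.ofList jokbo) (jokbo.length + 1) me [me]

-- ===== PORT B =====
-- `for parent, children in jokbo.items(): for c in children: rev.setdefault(c, parent)`
def buildRev (jokbo : List (Int × List Int)) : PySem.Dict Int Int :=
  (PySem.Dict.ofList jokbo).items.foldl
    (fun r pc => pc.2.foldl (fun r c => PySem.Dict.setdefault r c pc.1) r)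
    PySem.Dict.empty

-- `def chain(x): return [x] if x not in rev else [x] + chain(rev[x])`
def chainB (rev : PySem.Dict Int Int) : Nat → Int → List Int
  | 0, x => [x]
  | f + 1, x =>
    match PySem.Dict.get? rev x with
    | none => [x]
    | some p => x :: chainB rev f p

def compose_own_parents_alt (me : Int) (jokbo : List (Int × List Int)) : List Int :=
  chainB (buildRev jokbo) (jokbo.length + 1) me

-- ===== PRECONDITION & SPEC =====
-- first-parent map, stated independently of the ports
def pvFp (jokbo : List (Int × List Int)) (c : Int) : Option Int :=
  ((PySem.Dict.ofList jokbo).items.find? (fun pc => decide (c ∈ pc.2))).map Prod.fst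

-- the parent chain from c reaches a parentless person within k steps
def pvTerm (jokbo : List (Int × List Int)) : Nat → Int → Bool
  | 0, c => (pvFp jokbo c).isNone
  | k + 1, c =>
    match pvFp jokbo c with
    | none => true
    | some p => pvTerm jokbo k p

-- Pre_ excludes exactly the inputs whose parent chain from `me` cycles: Python A's
-- `while True` loop never returns there (it diverges).
def Pre_compose_own_parents (me : Int) (jokbo : List (Int × List Int)) : Prop :=
  pvTerm jokbo jokbo.length me = true
instance (me : Int) (jokbo : List (Int × List Int)) : Decidable (Pre_compose_own_parents me jokbo) := by unfold Pre_compose_own_parents; infer_instance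

def pvWitness_compose_own_parents : Int × (List (Int × List Int)) :=
  (3, [(1, [2, 3]), (2, [])])

def Spec_compose_own_parents (me : Int) (jokbo : List (Int × List Int)) (out : List Int) : Prop := out = compose_own_parents_alt me jokbo
instance (me : Int) (jokbo : List (Int × List Int)) (out : List Int) : Decidable (Spec_compose_own_parents me jokbo out) := by unfold Spec_compose_own_parents; infer_instance

-- ===== CLAIM (what is proved, stated in full; the proofs are below) =====
def Claim_equal_compose_own_parents : Prop := ∀ (me : Int) (jokbo : List (Int × List Int)), Dom_compose_own_parents me jokbo → Pre_compose_own_parents me jokbo → Spec_compose_own_parents me jokbo (compose_own_parents me jokbo)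

-- ===== LEMMAS AND PROOFS =====

theorem find?_congr_mem {α : Type} {l : List α} {p q : α → Bool}
    (h : ∀ x ∈ l, p x = q x) : l.find? p = l.find? q := by
  induction l with
  | nil => rfl
  | cons a l ih =>
    simp only [List.find?]
    rw [h a (List.mem_cons_self)]
    cases q a with
    | true => rfl
    | false => exact ih (fun x hx => h x (List.mem_cons_of_mem _ hx))

theorem get?_inner_fold (p : Int) (cs : List Int) (c : Int) :
    ∀ r : PySem.Dict Int Int,
      PySem.Dict.get? (cs.foldl (fun r c' => PySem.Dict.setdefault r c' p) r) c
      = if PySem.Dict.get? r c = none ∧ c ∈ cs then some p else PySem.Dict.get? r c := by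
  induction cs with
  | nil => intro r; simp
  | cons a cs ih =>
    intro r
    simp only [List.foldl_cons]
    rw [ih]
    by_cases hac : c = a
    · subst hac
      cases h : PySem.Dict.get? r c with
      | none =>
        simp [PySem.Dict.get?_setdefault_self, h]
      | some v =>
        have : PySem.Dict.get? (PySem.Dict.setdefault r c p) c = some v := by
          rw [PySem.Dict.get?_setdefault_self, h]; rfl
        simp [this]
    · rw [PySem.Dict.get?_setdefault_of_ne r p hac]
      by_cases hc : PySem.Dict.get? r c = none
      · simp [hc, hac]
      · simp [hc]

theorem get?_buildRev_fold (c : Int) :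
    ∀ (l : List (Int × List Int)) (r : PySem.Dict Int Int),
      PySem.Dict.get?
        (l.foldl (fun r pc => pc.2.foldl (fun r c' => PySem.Dict.setdefault r c' pc.1) r) r) c
      = match PySem.Dict.get? r c with
        | some v => some v
        | none => (l.find? (fun pc => decide (c ∈ pc.2))).map Prod.fst := by
  intro l
  induction l with
  | nil => intro r; cases h : PySem.Dict.get? r c <;> simp [h]
  | cons pc l ih =>
    intro r
    simp only [List.foldl_cons]
    rw [ih, get?_inner_fold]
    by_cases hc : PySem.Dict.get? r c = none
    · by_cases hm : c ∈ pc.2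
      · simp [hc, hm, List.find?]
      · simp [hc, hm, List.find?]
    · cases h : PySem.Dict.get? r c with
      | none => exact absurd h hc
      | some v => simp

theorem findParentA_eq_find_items (d : PySem.Dict Int (List Int)) (hnd : d.keys.Nodup) (c : Int) :
    findParentA d c = (d.items.find? (fun pc => decide (c ∈ pc.2))).map Prod.fst := by
  unfold findParentA
  have hkeys : PySem.Dict.keys d = d.items.map Prod.fst := rfl
  rw [hkeys, List.find?_map]
  congr 1
  apply find?_congr_mem
  intro pc hpc
  simp only [Function.comp]
  congr 1
  have : PySem.Dict.getD d pc.1 [] = pc.2 :=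
    PySem.Dict.getD_of_mem_items d (by simpa using hpc) hnd []
  simp [this]

theorem get?_buildRev (jokbo : List (Int × List Int)) (c : Int) :
    PySem.Dict.get? (buildRev jokbo) c = findParentA (PySem.Dict.ofList jokbo) c := by
  unfold buildRev
  rw [get?_buildRev_fold, findParentA_eq_find_items _ (PySem.Dict.nodup_keys_ofList jokbo)]
  simp [PySem.Dict.get?_empty]

-- chainB always starts with its argument
theorem chainB_head (rev : PySem.Dict Int Int) :
    ∀ (f : Nat) (x : Int), chainB rev f x = x :: (chainB rev f x).tail := by
  intro f x
  cases f with
  | zero => rfl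
  | succ f =>
    simp only [chainB]
    cases PySem.Dict.get? rev x <;> rfl

-- A's accumulator loop produces acc ++ the tail of B's cons-built chain
theorem goA_eq_tail_chainB (d : PySem.Dict Int (List Int)) (rev : PySem.Dict Int Int)
    (h : ∀ c, PySem.Dict.get? rev c = findParentA d c) :
    ∀ (f : Nat) (me : Int) (acc : List Int),
      goA d f me acc = acc ++ (chainB rev f me).tail := by
  intro f
  induction f with
  | zero => intro me acc; simp [goA, chainB]
  | succ f ih =>
    intro me acc
    simp only [goA, chainB, ← h me]
    cases PySem.Dict.get? rev me with
    | none => simp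
    | some p =>
      dsimp only
      rw [ih p (acc ++ [p]), chainB_head rev f p]
      simp

-- ===== VERDICT (by name: the statement is the Claim_ definition above) =====
theorem compose_own_parents_spec : Claim_equal_compose_own_parents := by
  intro me jokbo _ _
  show compose_own_parents me jokbo = compose_own_parents_alt me jokbo
  unfold compose_own_parents compose_own_parents_alt
  rw [goA_eq_tail_chainB _ _ (fun c => get?_buildRev jokbo c)]
  rw [chainB_head (buildRev jokbo) (jokbo.length + 1) me]
  simp
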